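-- pv_equiv track=rewrite | github.com/Qlb6x/DiffusionABSA | diffusionabsa/sampling.py | get_simple_graph
-- ===== SOURCE A (Python) =====
-- def get_simple_graph(seq_len, feature_data):
--     """
--     To create a table t_{i,j} in T. t_{i,j} = 1, which means there is an edge between the word i and word j.
--     :param seq_len: token
--     :param feature_data: dependency head. Specifically, '0' represents the head word is ROOT
--     :return:
--     """
--     assert len(feature_data) == seq_len
--     ret = [[0] * seq_len for _ in range(seq_len)]
--     for i, item in enumerate(feature_data):
--         if int(item) == 0:
--             ret[i][i] = 1
--             continue
--         ret[i][int(item) - 1] = 1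
--         ret[int(item) - 1][i] = 1
--         ret[i][i] = 1
--     return ret
-- ===== SOURCE B (Python) =====
-- def get_simple_graph(seq_len, feature_data):
--     assert len(feature_data) == seq_len
--     heads = [int(x) for x in feature_data]
--     # cell (i, j) is 1 iff i == j or word j is the head of word i or vice versa
--     # (head value 0 means ROOT, so it produces no off-diagonal edge)
--     return [[1 if i == j or heads[i] == j + 1 or heads[j] == i + 1 else 0
--              for j in range(seq_len)]
--             for i in range(seq_len)]
-- ===== Notes on version B (the rewrite author's own statement) =====
-- stated objective: idiomatic
-- what changed: B replaces A's sparse edge-setting mutation loop over a preallocated matrix by a nested comprehension computing each cell (i,j) directly from the symmetric predicate i==j or heads[i]==j+1 or heads[j]==i+1; Pre_ excludes negative dependency heads, which are malformed input (heads are 0 for ROOT or 1..seq_len) on which A only returns a matrix via Python's negative-index wraparound.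
-- outside the precondition, e.g. on get_simple_graph(2, [0, -1]): A returns [[1, 1], [1, 1]], B returns [[1, 0], [0, 1]]
import Mathlib
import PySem

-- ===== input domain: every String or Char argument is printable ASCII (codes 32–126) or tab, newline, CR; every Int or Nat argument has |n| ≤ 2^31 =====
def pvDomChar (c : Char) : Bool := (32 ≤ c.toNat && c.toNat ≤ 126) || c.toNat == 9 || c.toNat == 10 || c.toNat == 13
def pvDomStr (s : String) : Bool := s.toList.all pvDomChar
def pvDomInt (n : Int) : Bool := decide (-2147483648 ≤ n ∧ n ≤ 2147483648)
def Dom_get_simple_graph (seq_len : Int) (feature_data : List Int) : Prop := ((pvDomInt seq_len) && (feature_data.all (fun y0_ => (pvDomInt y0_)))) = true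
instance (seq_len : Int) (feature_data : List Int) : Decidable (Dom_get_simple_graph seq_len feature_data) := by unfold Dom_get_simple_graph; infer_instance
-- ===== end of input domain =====

-- B replaces A's sparse edge-setting mutation loop by a per-cell predicate comprehension (same cost, no mutation).

-- ===== PORT A =====
-- Python 'row[j] = 1' with possibly negative j (negative-index wraparound); an out-of-range j
-- raises IndexError in Python and is excluded by Pre_ (List.set is then the identity here).
def pySetAt (xs : List Int) (j : Int) : List Int :=
  let jj := if j < 0 then j + xs.length else j
  xs.set jj.toNat 1

-- Python 'ret[i][j] = 1' on a list of rows, same wraparound convention for i.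
def pySetCell (ret : List (List Int)) (i j : Int) : List (List Int) :=
  let ii := if i < 0 then i + ret.length else i
  ret.modify ii.toNat (fun row => pySetAt row j)

-- one iteration of A's 'for i, item in enumerate(feature_data)' loop body
def gsgStep (ret : List (List Int)) (p : Int × Int) : List (List Int) :=
  if p.2 = 0 then pySetCell ret p.1 p.1
  else pySetCell (pySetCell (pySetCell ret p.1 (p.2 - 1)) (p.2 - 1) p.1) p.1 p.1

def get_simple_graph (seq_len : Int) (feature_data : List Int) : List (List Int) :=
  -- 'assert len(feature_data) == seq_len': failure raises AssertionError, excluded by Pre_.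
  let ret := List.replicate seq_len.toNat (List.replicate seq_len.toNat 0)
  (PySem.List.enumerate feature_data 0).foldl gsgStep ret

-- ===== PORT B =====
-- 'heads = [int(x) for x in feature_data]' is the identity on ints.
def get_simple_graph_alt (seq_len : Int) (feature_data : List Int) : List (List Int) :=
  let heads := feature_data.map (fun x => x)
  (List.range seq_len.toNat).map (fun i =>
    (List.range seq_len.toNat).map (fun j =>
      if i = j ∨ heads.getD i 0 = (j : Int) + 1 ∨ heads.getD j 0 = (i : Int) + 1
      then 1 else 0))

-- ===== PRECONDITION & SPEC =====
-- Pre_ restricts to the natural domain of dependency-head input: the length matches seq_len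
-- (else A raises AssertionError) and every head is 0 (ROOT) or a word index 1..seq_len;
-- heads above seq_len or below 1-seq_len raise IndexError in A, and negative in-range heads
-- are malformed input on which A's returned matrix is only an artefact of Python's
-- negative-index wraparound.
def Pre_get_simple_graph (seq_len : Int) (feature_data : List Int) : Prop :=
  (feature_data.length : Int) = seq_len ∧ ∀ x ∈ feature_data, 0 ≤ x ∧ x ≤ seq_len
instance (seq_len : Int) (feature_data : List Int) : Decidable (Pre_get_simple_graph seq_len feature_data) := by unfold Pre_get_simple_graph; infer_instance

def pvWitness_get_simple_graph : Int × List Int := (3, [0, 3, 1])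

def Spec_get_simple_graph (seq_len : Int) (feature_data : List Int) (out : List (List Int)) : Prop := out = get_simple_graph_alt seq_len feature_data
instance (seq_len : Int) (feature_data : List Int) (out : List (List Int)) : Decidable (Spec_get_simple_graph seq_len feature_data out) := by unfold Spec_get_simple_graph; infer_instance

-- ===== CLAIM (what is proved, stated in full; the proofs are below) =====
def Claim_equal_get_simple_graph : Prop := ∀ (seq_len : Int) (feature_data : List Int), Dom_get_simple_graph seq_len feature_data → Pre_get_simple_graph seq_len feature_data → Spec_get_simple_graph seq_len feature_data (get_simple_graph seq_len feature_data)

-- ===== LEMMAS AND PROOFS =====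

-- the value of cell (i, j) of a matrix, 0 when out of range
def gsgCell (ret : List (List Int)) (i j : Nat) : Int := (ret.getD i []).getD j 0

-- one edge predicate: does processing pair p set cell (i, j)?
def gsgHit (p : Int × Int) (i j : Nat) : Bool :=
  (p.1 == (i : Int) && p.1 == (j : Int)) ||
  (!(p.2 == 0) && p.1 == (i : Int) && p.2 - 1 == (j : Int)) ||
  (!(p.2 == 0) && p.1 == (j : Int) && p.2 - 1 == (i : Int))

theorem length_pySetAt (xs : List Int) (j : Int) : (pySetAt xs j).length = xs.length := by
  simp [pySetAt]

theorem length_pySetCell (ret : List (List Int)) (a b : Int) :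
    (pySetCell ret a b).length = ret.length := by
  simp [pySetCell]

theorem length_mem_pySetCell (ret : List (List Int)) (a b : Int) (n : Nat)
    (h : ∀ r ∈ ret, r.length = n) : ∀ r ∈ pySetCell ret a b, r.length = n := by
  intro r hr
  obtain ⟨k, hk, rfl⟩ := List.mem_iff_getElem.mp hr
  have hk' : k < ret.length := by simpa [length_pySetCell] using hk
  simp only [pySetCell]
  rw [List.getElem_modify]
  rcases eq_or_ne ((if a < 0 then a + (ret.length : Int) else a).toNat) k with he | he
  · rw [if_pos he, length_pySetAt]; exact h _ (List.getElem_mem hk')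
  · rw [if_neg he]; exact h _ (List.getElem_mem hk')

theorem pySetAt_toNat (row : List Int) (n : Nat) (hrow : row.length = n) (x : Int) (b : Nat)
    (hb : (if x < 0 then x + (n : Int) else x) = (b : Int)) :
    pySetAt row x = row.set b 1 := by
  simp only [pySetAt, hrow, hb, Int.toNat_natCast]

theorem pySetCell_fst (ret : List (List Int)) (n : Nat) (hlen : ret.length = n)
    (x : Int) (b : Nat) (hb : (if x < 0 then x + (n : Int) else x) = (b : Int)) (y : Int) :
    pySetCell ret x y = pySetCell ret (b : Int) y := by
  have hb' : (if (b : Int) < 0 then (b : Int) + (n : Int) else (b : Int)) = (b : Int) := by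
    rw [if_neg (by omega)]
  simp only [pySetCell, hlen, hb, hb']

theorem pySetCell_snd (ret : List (List Int)) (n : Nat) (hrows : ∀ r ∈ ret, r.length = n)
    (a : Int) (y : Int) (b : Nat)
    (hb : (if y < 0 then y + (n : Int) else y) = (b : Int)) :
    pySetCell ret a y = pySetCell ret a (b : Int) := by
  simp only [pySetCell]
  apply List.ext_getElem?
  intro k
  rw [List.getElem?_modify, List.getElem?_modify]
  cases h : ret[k]? with
  | none => rfl
  | some r =>
    have hr : r.length = n := hrows r (List.mem_of_getElem? h)
    have h1 : pySetAt r y = r.set b 1 := pySetAt_toNat r n hr y b hb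
    have h2 : pySetAt r (b : Int) = r.set b 1 :=
      pySetAt_toNat r n hr (b : Int) b (by rw [if_neg (by omega)])
    simp [h1, h2]

theorem getElem_pySetCell_nat (ret : List (List Int)) (a : Nat) (b : Int) (k : Nat)
    (hk : k < ret.length) :
    (pySetCell ret (a : Int) b)[k]'(by simpa [length_pySetCell] using hk) =
      if a = k then pySetAt (ret[k]'hk) b else ret[k]'hk := by
  have ha : (if (a : Int) < 0 then (a : Int) + (ret.length : Int) else (a : Int)).toNat = a := by
    rw [if_neg (by omega)]; omega
  simp only [pySetCell, ha]
  rw [List.getElem_modify]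

theorem cell_pySetCell (ret : List (List Int)) (n a b i j : Nat)
    (hlen : ret.length = n) (hrows : ∀ r ∈ ret, r.length = n)
    (hb : b < n) (hi : i < n) (hj : j < n) :
    gsgCell (pySetCell ret (a : Int) (b : Int)) i j =
      if i = a ∧ j = b then 1 else gsgCell ret i j := by
  have hiL : i < ret.length := by omega
  have hiL' : i < (pySetCell ret (a : Int) (b : Int)).length := by
    rw [length_pySetCell]; omega
  unfold gsgCell
  rw [List.getD_eq_getElem _ _ hiL', List.getD_eq_getElem _ _ hiL,
    getElem_pySetCell_nat ret a (b : Int) i hiL]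
  by_cases hai : a = i
  · rw [if_pos hai]
    have hbL : b < (ret[i]'hiL).length := by
      rw [hrows _ (List.getElem_mem hiL)]; omega
    have hset : pySetAt (ret[i]'hiL) (b : Int) = (ret[i]'hiL).set b 1 := by
      have hisb : (if (b : Int) < 0 then (b : Int) + ((ret[i]'hiL).length : Int)
          else (b : Int)).toNat = b := by
        rw [if_neg (by omega)]; omega
      simp only [pySetAt, hisb]
    rw [hset]
    by_cases hjb : j = b
    · subst hjb
      rw [if_pos ⟨hai.symm, rfl⟩]
      rw [List.getD_eq_getElem?_getD, List.getElem?_set]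
      simp [hbL]
    · rw [if_neg (by tauto)]
      rw [List.getD_eq_getElem?_getD, List.getD_eq_getElem?_getD, List.getElem?_set]
      rw [if_neg (by omega)]
  · rw [if_neg hai, if_neg (by tauto)]

theorem cell_gsgStep (ret : List (List Int)) (n i j : Nat) (p : Int × Int)
    (hlen : ret.length = n) (hrows : ∀ r ∈ ret, r.length = n)
    (hp : 0 ≤ p.1 ∧ p.1 < (n : Int) ∧ 0 ≤ p.2 ∧ p.2 ≤ (n : Int))
    (hi : i < n) (hj : j < n) :
    gsgCell (gsgStep ret p) i j = if gsgHit p i j then 1 else gsgCell ret i j := by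
  obtain ⟨p1, p2⟩ := p
  obtain ⟨h1, h2, h3, h4⟩ := hp
  simp only at h1 h2 h3 h4
  obtain ⟨a, rfl⟩ := Int.eq_ofNat_of_zero_le h1
  have han : a < n := by exact_mod_cast h2
  by_cases hz : p2 = 0
  · rw [gsgStep, if_pos hz]
    rw [pySetCell_snd ret n hrows (a : Int) (a : Int) a (by rw [if_neg (by omega)])]
    rw [cell_pySetCell ret n a a i j hlen hrows han hi hj]
    have hh : gsgHit ((a : Int), p2) i j = (decide (i = a) && decide (j = a)) := by
      subst hz
      rw [Bool.eq_iff_iff]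
      simp only [gsgHit, Bool.or_eq_true, Bool.and_eq_true, Bool.not_eq_true', beq_iff_eq,
        beq_eq_false_iff_ne, decide_eq_true_eq]
      constructor
      · rintro ((⟨ha1, ha2⟩ | ⟨⟨h0, _⟩, _⟩) | ⟨⟨h0, _⟩, _⟩)
        · exact ⟨by omega, by omega⟩
        · exact absurd rfl h0
        · exact absurd rfl h0
      · rintro ⟨ha1, ha2⟩
        exact Or.inl (Or.inl ⟨by omega, by omega⟩)
    rw [hh]
    by_cases hia : i = a <;> by_cases hja : j = a <;> simp_all
  · have hxb : ∃ b : Nat, ((if p2 - 1 < 0 then p2 - 1 + (n : Int) else p2 - 1) = (b : Int)) ∧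
        b < n ∧ p2 - 1 = (b : Int) := by
      refine ⟨(p2 - 1).toNat, by rw [if_neg (by omega)]; omega, by omega, by omega⟩
    obtain ⟨b, hbif, hbn, hbeq⟩ := hxb
    rw [gsgStep, if_neg hz]
    rw [pySetCell_snd ret n hrows (a : Int) (p2 - 1) b hbif]
    rw [pySetCell_fst (pySetCell ret (a : Int) (b : Int)) n
        (by rw [length_pySetCell, hlen]) (p2 - 1) b hbif (a : Int)]
    rw [pySetCell_snd _ n
        (length_mem_pySetCell _ _ _ n (length_mem_pySetCell _ _ _ n hrows))
        (a : Int) (a : Int) a (by rw [if_neg (by omega)])]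
    rw [cell_pySetCell _ n a a i j (by simp [length_pySetCell, hlen])
        (length_mem_pySetCell _ _ _ n (length_mem_pySetCell _ _ _ n hrows)) han hi hj]
    rw [cell_pySetCell _ n b a i j (by simp [length_pySetCell, hlen])
        (length_mem_pySetCell _ _ _ n hrows) han hi hj]
    rw [cell_pySetCell ret n a b i j hlen hrows hbn hi hj]
    have hh : gsgHit ((a : Int), p2) i j =
        ((decide (i = a) && decide (j = a)) || (decide (i = a) && decide (j = b)) ||
         (decide (i = b) && decide (j = a))) := by
      rw [Bool.eq_iff_iff]
      simp only [gsgHit, Bool.or_eq_true, Bool.and_eq_true, Bool.not_eq_true', beq_iff_eq,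
        beq_eq_false_iff_ne, decide_eq_true_eq]
      omega
    rw [hh]
    by_cases hia : i = a <;> by_cases hja : j = a <;> by_cases hib : i = b <;>
      by_cases hjb : j = b <;> simp_all

theorem dims_gsgStep (ret : List (List Int)) (n : Nat) (p : Int × Int)
    (hlen : ret.length = n) (hrows : ∀ r ∈ ret, r.length = n) :
    (gsgStep ret p).length = n ∧ ∀ r ∈ gsgStep ret p, r.length = n := by
  unfold gsgStep
  split <;>
    exact ⟨by simp [length_pySetCell, hlen],
      by
        first
        | exact length_mem_pySetCell _ _ _ n hrows
        | exact length_mem_pySetCell _ _ _ n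
            (length_mem_pySetCell _ _ _ n (length_mem_pySetCell _ _ _ n hrows))⟩

theorem cell_foldl (l : List (Int × Int)) (n : Nat)
    (hl : ∀ p ∈ l, 0 ≤ p.1 ∧ p.1 < (n : Int) ∧ 0 ≤ p.2 ∧ p.2 ≤ (n : Int)) :
    ∀ (ret : List (List Int)), ret.length = n → (∀ r ∈ ret, r.length = n) →
    ∀ i j : Nat, i < n → j < n →
    gsgCell (l.foldl gsgStep ret) i j =
      if l.any (fun p => gsgHit p i j) then 1 else gsgCell ret i j := by
  induction l with
  | nil => intro ret _ _ i j _ _; simp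
  | cons p l ih =>
    intro ret hlen hrows i j hi hj
    have hp := hl p (List.mem_cons_self)
    have hdims := dims_gsgStep ret n p hlen hrows
    have hrest : ∀ q ∈ l, 0 ≤ q.1 ∧ q.1 < (n : Int) ∧ 0 ≤ q.2 ∧ q.2 ≤ (n : Int) :=
      fun q hq => hl q (List.mem_cons_of_mem _ hq)
    rw [List.foldl_cons, ih hrest _ hdims.1 hdims.2 i j hi hj,
      cell_gsgStep ret n i j p hlen hrows hp hi hj]
    by_cases h1 : l.any (fun q => gsgHit q i j) <;> by_cases h2 : gsgHit p i j <;>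
      simp [h1, h2]

theorem cell_replicate (n i j : Nat) :
    gsgCell (List.replicate n (List.replicate n (0 : Int))) i j = 0 := by
  simp only [gsgCell, List.getD_eq_getElem?_getD, List.getElem?_replicate]
  split <;> simp [List.getElem?_replicate] <;> split <;> simp

theorem any_hit_iff (fd : List Int) (n i j : Nat) (hn : fd.length = n)
    (hi : i < n) (hj : j < n) :
    ((PySem.List.enumerate fd 0).any (fun p => gsgHit p i j) = true) ↔
      (i = j ∨ fd.getD i 0 = (j : Int) + 1 ∨ fd.getD j 0 = (i : Int) + 1) := by
  subst hn
  rw [List.any_eq_true]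
  constructor
  · rintro ⟨p, hp, hhit⟩
    rw [PySem.List.mem_enumerate_iff] at hp
    obtain ⟨k, hk, rfl⟩ := hp
    simp only [gsgHit, Bool.or_eq_true, Bool.and_eq_true, Bool.not_eq_true', beq_iff_eq,
      beq_eq_false_iff_ne, zero_add] at hhit
    rcases hhit with (⟨h1, h2⟩ | ⟨⟨h0, h1⟩, h2⟩) | ⟨⟨h0, h1⟩, h2⟩
    · left; omega
    · right; left
      have : k = i := by exact_mod_cast h1
      subst this
      rw [List.getD_eq_getElem _ _ hi]; omega
    · right; right
      have : k = j := by exact_mod_cast h1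
      subst this
      rw [List.getD_eq_getElem _ _ hj]; omega
  · rintro (h | h | h)
    · refine ⟨((i : Int), fd[i]), ?_, ?_⟩
      · rw [PySem.List.mem_enumerate_iff]; exact ⟨i, hi, by simp⟩
      · simp only [gsgHit, Bool.or_eq_true, Bool.and_eq_true, Bool.not_eq_true', beq_iff_eq,
          beq_eq_false_iff_ne]
        exact Or.inl (Or.inl ⟨by trivial, by omega⟩)
    · refine ⟨((i : Int), fd[i]), ?_, ?_⟩
      · rw [PySem.List.mem_enumerate_iff]; exact ⟨i, hi, by simp⟩
      · rw [List.getD_eq_getElem _ _ hi] at h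
        simp only [gsgHit, Bool.or_eq_true, Bool.and_eq_true, Bool.not_eq_true', beq_iff_eq,
          beq_eq_false_iff_ne]
        exact Or.inl (Or.inr ⟨⟨by omega, by trivial⟩, by omega⟩)
    · refine ⟨((j : Int), fd[j]), ?_, ?_⟩
      · rw [PySem.List.mem_enumerate_iff]; exact ⟨j, hj, by simp⟩
      · rw [List.getD_eq_getElem _ _ hj] at h
        simp only [gsgHit, Bool.or_eq_true, Bool.and_eq_true, Bool.not_eq_true', beq_iff_eq,
          beq_eq_false_iff_ne]
        exact Or.inr ⟨⟨by omega, by trivial⟩, by omega⟩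

-- ===== VERDICT (by name: the statement is the Claim_ definition above) =====
theorem get_simple_graph_spec : Claim_equal_get_simple_graph := by
  intro seq_len fd _ hpre
  obtain ⟨hlen, hbnd⟩ := hpre
  set n := fd.length with hn
  have hsn : seq_len.toNat = n := by omega
  have hsl : seq_len = (n : Int) := by omega
  have hgs : get_simple_graph seq_len fd =
      (PySem.List.enumerate fd 0).foldl gsgStep
        (List.replicate n (List.replicate n (0 : Int))) := by
    rw [get_simple_graph, hsn]
  have hrows0 : ∀ r ∈ List.replicate n (List.replicate n (0 : Int)), r.length = n := by
    intro r hr; rw [List.eq_of_mem_replicate hr]; simp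
  have hl : ∀ p ∈ PySem.List.enumerate fd 0,
      0 ≤ p.1 ∧ p.1 < (n : Int) ∧ 0 ≤ p.2 ∧ p.2 ≤ (n : Int) := by
    intro p hp
    rw [PySem.List.mem_enumerate_iff] at hp
    obtain ⟨k, hk, rfl⟩ := hp
    have := hbnd fd[k] (List.getElem_mem hk)
    exact ⟨by simp, by simpa using hk, by simp; omega, by simp; omega⟩
  have hA : ∀ i j : Nat, i < n → j < n →
      gsgCell (get_simple_graph seq_len fd) i j =
        if i = j ∨ fd.getD i 0 = (j : Int) + 1 ∨ fd.getD j 0 = (i : Int) + 1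
        then 1 else 0 := by
    intro i j hi hj
    rw [hgs, cell_foldl _ n hl _ (by simp) hrows0 i j hi hj, cell_replicate]
    by_cases h : (PySem.List.enumerate fd 0).any (fun p => gsgHit p i j) = true
    · rw [if_pos h, if_pos ((any_hit_iff fd n i j hn.symm hi hj).mp h)]
    · rw [if_neg h, if_neg (fun hc => h ((any_hit_iff fd n i j hn.symm hi hj).mpr hc))]
  have hdimsfold : ∀ (l : List (Int × Int)) (ret : List (List Int)),
      ret.length = n → (∀ r ∈ ret, r.length = n) →
      (l.foldl gsgStep ret).length = n ∧ ∀ r ∈ l.foldl gsgStep ret, r.length = n := by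
    intro l
    induction l with
    | nil => intro ret h1 h2; exact ⟨h1, h2⟩
    | cons p l ih =>
      intro ret h1 h2
      have := dims_gsgStep ret n p h1 h2
      rw [List.foldl_cons]
      exact ih _ this.1 this.2
  have hAdims : (get_simple_graph seq_len fd).length = n ∧
      ∀ r ∈ get_simple_graph seq_len fd, r.length = n := by
    rw [hgs]
    exact hdimsfold _ _ (by simp) hrows0
  have hB : get_simple_graph_alt seq_len fd =
      (List.range n).map (fun i => (List.range n).map (fun j =>
        (if i = j ∨ fd.getD i 0 = (j : Int) + 1 ∨ fd.getD j 0 = (i : Int) + 1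
          then (1 : Int) else 0))) := by
    rw [get_simple_graph_alt, hsn]
    simp [List.map_id']
  show get_simple_graph seq_len fd = get_simple_graph_alt seq_len fd
  rw [hB]
  apply List.ext_getElem
  · simp [hAdims.1]
  · intro i hi hi'
    have hin : i < n := by rw [hAdims.1] at hi; exact hi
    apply List.ext_getElem
    · have := hAdims.2 _ (List.getElem_mem hi)
      simp [this, hin]
    · intro j hj hj'
      have hjn : j < n := by
        have := hAdims.2 _ (List.getElem_mem hi); omega
      have hc := hA i j hin hjn
      have hiA : i < (get_simple_graph seq_len fd).length := by rw [hAdims.1]; exact hin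
      have hjA : j < ((get_simple_graph seq_len fd)[i]'hiA).length := by
        rw [hAdims.2 _ (List.getElem_mem hiA)]; exact hjn
      rw [gsgCell, List.getD_eq_getElem _ _ hiA, List.getD_eq_getElem _ _ hjA] at hc
      rw [hc]
      simp only [List.getElem_map, List.getElem_range]
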